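-- pv_equiv track=rewrite | github.com/ArjunMD/MyChessNotebook | app.py | game_has_move_anywhere
-- ===== SOURCE A (Python) =====
-- from typing import Dict, Tuple, List
--
-- def _norm_san(s: str) -> str:
--     return san_match_key(s)
--
-- def normalize_castling_san(s: str) -> str:
--     s = (s or "").strip()
--     if not s:
--         return s
--
--     suffix = ""
--     if s[-1] in {"+", "#"}:
--         suffix = s[-1]
--         core = s[:-1].strip()
--     else:
--         core = s
--
--     core_u = core.upper()
--     if core_u in {"0-0", "O-O"}:
--         return "O-O" + suffix
--     if core_u in {"0-0-0", "O-O-O"}: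
--         return "O-O-O" + suffix
--
--     return core + suffix
--
-- def san_match_key(s: str) -> str:
--     """
--     Normalized key for *matching only*.
--     Ignores capture/check/mate decoration so users can type with or without them.
--     """
--     s = normalize_castling_san(s or "").strip()
--
--     # ignore check/mate suffix (and any accidental trailing whitespace)
--     s = s.rstrip().rstrip("+#")
--
--     # ignore capture marker
--     s = s.replace("x", "")
--
--     # optional: tolerate promotion notation differences: "e8Q" vs "e8=Q"
--     s = s.replace("=", "")
--
--     return s
--
-- def game_has_move_anywhere(moves_san: List[str], target_san: str, side: str = "white") -> bool:
--     t = _norm_san(target_san)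
--     if not t:
--         return False
--
--     for i, san in enumerate(moves_san):
--         if _norm_san(san) != t:
--             continue
--         if side == "white" and (i % 2 != 0):
--             continue
--         if side == "black" and (i % 2 != 1):
--             continue
--         return True
--
--     return False
-- ===== SOURCE B (Python) =====
-- from typing import List
--
--
-- def _norm_san(s: str) -> str:
--     return san_match_key(s)
--
--
-- def normalize_castling_san(s: str) -> str:
--     s = (s or "").strip()
--     if not s:
--         return s
--
--     suffix = ""
--     if s[-1] in {"+", "#"}:
--         suffix = s[-1]
--         core = s[:-1].strip()
--     else:
--         core = s
--
--     core_u = core.upper()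
--     if core_u in {"0-0", "O-O"}:
--         return "O-O" + suffix
--     if core_u in {"0-0-0", "O-O-O"}:
--         return "O-O-O" + suffix
--
--     return core + suffix
--
--
-- def san_match_key(s: str) -> str:
--     s = normalize_castling_san(s or "").strip()
--     s = s.rstrip().rstrip("+#")
--     s = s.replace("x", "")
--     s = s.replace("=", "")
--     return s
--
--
-- def game_has_move_anywhere(moves_san: List[str], target_san: str, side: str = "white") -> bool:
--     t = _norm_san(target_san)
--     if not t:
--         return False
--
--     # build a grouping index once: normalized SAN -> set of ply parities where it occurs
--     parities = {}
--     for i, san in enumerate(moves_san):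
--         parities.setdefault(_norm_san(san), set()).add(i % 2)
--
--     # the answer is a single lookup in the index
--     need = parities.get(t, set())
--     if side == "white":
--         return 0 in need
--     if side == "black":
--         return 1 in need
--     return bool(need)
-- ===== Notes on version B (the rewrite author's own statement) =====
-- stated objective: alternative
-- what changed: A is a single scan with early return and parity-skip continues; B builds a grouping index once (dict: normalized SAN -> set of ply parities at which it occurs), independent of the target, and then answers by one dictionary lookup plus a parity-set membership test (nonemptiness for non-white/black sides).
import Mathlib
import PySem

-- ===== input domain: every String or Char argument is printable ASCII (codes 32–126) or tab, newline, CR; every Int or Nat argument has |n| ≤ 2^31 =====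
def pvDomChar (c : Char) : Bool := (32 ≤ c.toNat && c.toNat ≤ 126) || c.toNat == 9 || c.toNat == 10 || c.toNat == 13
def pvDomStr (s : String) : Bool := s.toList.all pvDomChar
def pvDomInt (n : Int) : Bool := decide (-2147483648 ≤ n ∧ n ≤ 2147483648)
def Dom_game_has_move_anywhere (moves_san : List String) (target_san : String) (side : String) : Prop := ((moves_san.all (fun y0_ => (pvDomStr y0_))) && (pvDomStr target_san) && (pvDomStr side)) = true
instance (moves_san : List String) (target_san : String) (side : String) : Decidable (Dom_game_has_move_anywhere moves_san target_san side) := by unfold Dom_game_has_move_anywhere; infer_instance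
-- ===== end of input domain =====

-- B replaces A's early-exit scan with parity-skip `continue`s by a two-stage algorithm:
-- build a grouping index (normalized SAN -> set of ply parities) once, then answer by one
-- dictionary lookup; objective: alternative (same O(n) cost).


-- shared same-module helpers (both Pythons use these verbatim)
-- s.rstrip("+#") — hand port (PySem has no rstrip-with-chars); exact: drops trailing '+'/'#'
def rstripPlusHash (s : String) : String :=
  String.ofList ((s.toList.reverse.dropWhile (fun c => c == '+' || c == '#')).reverse)

def normalizeCastlingSan (s : String) : String :=
  let s := PySem.Str.strip s
  if s == "" then s
  else
    let sc : String × String :=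
      match PySem.Str.pyGet? s (-1) with
      | some c =>
          if c == '+' || c == '#' then
            (String.ofList [c], PySem.Str.strip (PySem.Str.slice s none (some (-1))))
          else ("", s)
      | none => ("", s)   -- unreachable: s ≠ ""
    let suffix := sc.1
    let core := sc.2
    let coreU := PySem.Str.upper core
    if coreU == "0-0" || coreU == "O-O" then "O-O" ++ suffix
    else if coreU == "0-0-0" || coreU == "O-O-O" then "O-O-O" ++ suffix
    else core ++ suffix

def sanMatchKey (s : String) : String :=
  let s := PySem.Str.strip (normalizeCastlingSan s)
  let s := rstripPlusHash (PySem.Str.rstrip s)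
  let s := PySem.Str.replace s "x" ""
  let s := PySem.Str.replace s "=" ""
  s

def normSan (s : String) : String := sanMatchKey s

-- ===== PORT A =====
-- the `for i, san in enumerate(moves_san)` loop, index carried explicitly
def aLoop (t side : String) : Nat → List String → Bool
  | _, [] => false
  | i, san :: rest =>
    if normSan san != t then aLoop t side (i + 1) rest
    else if side == "white" && (i % 2 != 0) then aLoop t side (i + 1) rest
    else if side == "black" && (i % 2 != 1) then aLoop t side (i + 1) rest
    else true

def game_has_move_anywhere (moves_san : List String) (target_san : String) (side : String) : Bool :=
  let t := normSan target_san
  if t == "" then false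
  else aLoop t side 0 moves_san

-- ===== PORT B =====
-- the index-building loop: parities.setdefault(_norm_san(san), set()).add(i % 2)
def buildParities (moves_san : List String) : PySem.Dict String (PySem.Set Int) :=
  (PySem.List.enumerate moves_san 0).foldl
    (fun d p => d.modify (normSan p.2) PySem.Set.empty
        (fun s => PySem.Set.add s (PySem.Int.mod p.1 2)))
    PySem.Dict.empty

def game_has_move_anywhere_alt (moves_san : List String) (target_san : String) (side : String) : Bool :=
  let t := normSan target_san
  if t == "" then false
  else
    let need := (buildParities moves_san).getD t PySem.Set.empty
    if side == "white" then PySem.Set.contains need 0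
    else if side == "black" then PySem.Set.contains need 1
    else !need.isEmpty   -- bool(need)

-- ===== PRECONDITION & SPEC =====
def Spec_game_has_move_anywhere (moves_san : List String) (target_san : String) (side : String) (out : Bool) : Prop := out = game_has_move_anywhere_alt moves_san target_san side
instance (moves_san : List String) (target_san : String) (side : String) (out : Bool) : Decidable (Spec_game_has_move_anywhere moves_san target_san side out) := by unfold Spec_game_has_move_anywhere; infer_instance

-- ===== CLAIM (what is proved, stated in full; the proofs are below) =====
def Claim_equal_game_has_move_anywhere : Prop := ∀ (moves_san : List String) (target_san : String) (side : String), Dom_game_has_move_anywhere moves_san target_san side → Spec_game_has_move_anywhere moves_san target_san side (game_has_move_anywhere moves_san target_san side)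

-- ===== LEMMAS AND PROOFS =====

-- "some move at a ply of parity p (counting from ply s) normalizes to t"
def anyPar (t : String) (p : Int) : Int → List String → Bool
  | _, [] => false
  | s, x :: xs => ((normSan x == t) && (PySem.Int.mod s 2 == p)) || anyPar t p (s + 1) xs

theorem isEmpty_add (s : PySem.Set Int) (x : Int) :
    (PySem.Set.add s x).isEmpty = false := by
  simp only [PySem.Set.add]
  split <;> cases s <;> simp_all

theorem containsFold (t : String) (p : Int) :
    ∀ (l : List String) (s : Int) (d : PySem.Dict String (PySem.Set Int)),
      PySem.Set.contains
        (((PySem.List.enumerate l s).foldl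
          (fun d q => d.modify (normSan q.2) PySem.Set.empty
              (fun u => PySem.Set.add u (PySem.Int.mod q.1 2))) d).getD t PySem.Set.empty) p
      = (PySem.Set.contains (d.getD t PySem.Set.empty) p || anyPar t p s l) := by
  intro l
  induction l with
  | nil => intro s d; simp [PySem.List.enumerate_nil, anyPar]
  | cons x xs ih =>
    intro s d
    rw [PySem.List.enumerate_cons]
    simp only [List.foldl_cons]
    rw [ih]
    rw [PySem.Dict.getD_modify]
    by_cases hk : t = normSan x
    · simp only [hk, anyPar]
      have : (normSan x == normSan x) = true := by simp
      simp only [this, Bool.true_and, PySem.Int.mod]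
      by_cases hp : p = s.fmod 2
      · simp [hp]
      · have hf : (s.fmod 2 == p) = false := by
          rw [beq_eq_false_iff_ne]; exact Ne.symm hp
        simp [hp, hf]
    · have hne : (normSan x == t) = false := by
        simp [beq_eq_false_iff_ne]; exact fun h => hk h.symm
      simp [hk, anyPar, hne]

theorem nonemptyFold (t : String) :
    ∀ (l : List String) (s : Int) (d : PySem.Dict String (PySem.Set Int)),
      (!(((PySem.List.enumerate l s).foldl
          (fun d q => d.modify (normSan q.2) PySem.Set.empty
              (fun u => PySem.Set.add u (PySem.Int.mod q.1 2))) d).getD t PySem.Set.empty).isEmpty)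
      = ((!(d.getD t PySem.Set.empty).isEmpty) || l.any (fun x => normSan x == t)) := by
  intro l
  induction l with
  | nil => intro s d; simp [PySem.List.enumerate_nil]
  | cons x xs ih =>
    intro s d
    rw [PySem.List.enumerate_cons]
    simp only [List.foldl_cons]
    rw [ih]
    rw [PySem.Dict.getD_modify]
    by_cases hk : t = normSan x
    · simp only [hk]
      simp
      left
      intro h
      have h2 := isEmpty_add (d.getD (normSan x) []) (s % 2)
      simp [h] at h2
    · have hne : (normSan x == t) = false := by
        simp [beq_eq_false_iff_ne]; exact fun h => hk h.symm
      simp [hk, hne]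

theorem aLoop_eq (t side : String) :
    ∀ (l : List String) (s : Nat),
      aLoop t side s l =
        (if side == "white" then anyPar t 0 (s : Int) l
         else if side == "black" then anyPar t 1 (s : Int) l
         else l.any (fun x => normSan x == t)) := by
  intro l
  induction l with
  | nil =>
    intro s
    simp only [aLoop, anyPar, List.any_nil]
    split
    · rfl
    · split <;> rfl
  | cons x xs ih =>
    intro s
    by_cases hm : normSan x = t
    · by_cases hw : side = "white"
      · subst hw
        by_cases hpar : s % 2 = 0
        · simp [aLoop, anyPar, hm, hpar]
          left; omega
        · have h1 : s % 2 = 1 := by omega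
          simp [aLoop, anyPar, hm, h1, ih]
          intro h; exfalso; omega
      · by_cases hb : side = "black"
        · subst hb
          by_cases hpar : s % 2 = 1
          · simp [aLoop, anyPar, hm, hpar]
            left; omega
          · have h0 : s % 2 = 0 := by omega
            simp [aLoop, anyPar, hm, h0, ih]
            intro h; exfalso; omega
        · simp [aLoop, hm, hw, hb]
    · have hne : (normSan x == t) = false := by rw [beq_eq_false_iff_ne]; exact hm
      simp [aLoop, anyPar, hne, ih]
      intro h; exact absurd h hm

-- ===== VERDICT (by name: the statement is the Claim_ definition above) =====
theorem game_has_move_anywhere_spec : Claim_equal_game_has_move_anywhere := by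
  intro moves_san target_san side _
  unfold Spec_game_has_move_anywhere game_has_move_anywhere game_has_move_anywhere_alt
  by_cases ht : normSan target_san == ""
  · simp [ht]
  · simp only [ht, Bool.false_eq_true, if_false, buildParities]
    rw [aLoop_eq, containsFold, containsFold, nonemptyFold]
    simp [PySem.Dict.getD_empty, PySem.Set.contains]
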